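-- pv_equiv track=rewrite | github.com/VamsiImmanneni/finalProjectSWEGPT | gt.py | function_26
-- ===== SOURCE A (Python) =====
-- def function_26(A, B):
--     """Column-wise sum excluding first column of B."""
--     n = len(A)
--     result = []
--     for j in range(1, n):
--         sum_col = 0
--         for i in range(n):
--             sum_col += A[i][j] + B[i][j]
--         result.append(sum_col)
--     return result
-- ===== SOURCE B (Python) =====
-- def function_26(A, B):
--     """Column-wise sum excluding first column of B."""
--     n = len(A)
--     rows = [[a + b for a, b in zip(ra[1:n], rb[1:n])] for ra, rb in zip(A, B)]
--     return [sum(col) for col in zip(*rows)]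
-- ===== Notes on version B (the rewrite author's own statement) =====
-- stated objective: idiomatic
-- what changed: Replaces A's nested index loops by building the elementwise-sum rows once with zip and slicing, transposing with zip(*rows), and summing each column with sum().
import Mathlib
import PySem

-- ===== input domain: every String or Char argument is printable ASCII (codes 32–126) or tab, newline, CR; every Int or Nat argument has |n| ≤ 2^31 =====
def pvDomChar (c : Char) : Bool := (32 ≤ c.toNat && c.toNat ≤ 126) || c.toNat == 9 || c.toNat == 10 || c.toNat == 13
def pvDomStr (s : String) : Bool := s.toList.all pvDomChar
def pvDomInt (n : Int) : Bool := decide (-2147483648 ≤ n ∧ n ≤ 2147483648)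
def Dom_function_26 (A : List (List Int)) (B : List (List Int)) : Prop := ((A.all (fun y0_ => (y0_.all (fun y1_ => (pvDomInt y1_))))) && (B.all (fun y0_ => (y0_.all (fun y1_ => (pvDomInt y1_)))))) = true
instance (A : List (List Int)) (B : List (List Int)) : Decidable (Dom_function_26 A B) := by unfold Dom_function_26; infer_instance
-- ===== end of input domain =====

-- B replaces A's nested index loops by building the elementwise-sum rows with zip and
-- slicing, transposing with zip(*rows) and summing each column (same cost, different
-- decomposition).

-- ===== PORT A =====
-- literal port of A: for j in range(1, n): sum over i in range(n), append
def function_26 (A : List (List Int)) (B : List (List Int)) : List Int :=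
  let n : Int := (A.length : Int)
  (PySem.List.pyRange 1 n 1).foldl (fun result j =>
    result ++ [(PySem.List.pyRange 0 n 1).foldl (fun sum_col i =>
      sum_col + (PySem.List.pyGetD (PySem.List.pyGetD A i []) j 0
                 + PySem.List.pyGetD (PySem.List.pyGetD B i []) j 0)) 0]) []

-- ===== PORT B =====
-- termination measure lemma for pvZipStar (cited by its decreasing_by)
theorem pvTailSum_lt : ∀ (S : List (List Int)), S ≠ [] → ¬ [] ∈ S →
    ((S.map List.tail).map List.length).sum < (S.map List.length).sum := by
  intro S hne hmem
  induction S with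
  | nil => exact absurd rfl hne
  | cons r S ih =>
    simp only [List.map_cons, List.sum_cons]
    have hr : r ≠ [] := fun h => hmem (by simp [h])
    have hr' : r.tail.length < r.length := by
      cases r with | nil => exact absurd rfl hr | cons x xs => simp
    rcases S with _ | ⟨s, S'⟩
    · simpa using hr'
    · have := ih (by simp) (fun h => hmem (List.mem_cons_of_mem _ h))
      omega

-- hand port of Python's zip(*rows): stop as soon as some row runs out
def pvZipStar (S : List (List Int)) : List (List Int) :=
  if h : S = [] ∨ [] ∈ S then []
  else (S.map (fun r => r.headD 0)) :: pvZipStar (S.map List.tail)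
termination_by (S.map List.length).sum
decreasing_by
  push_neg at h
  simpa using pvTailSum_lt S h.1 h.2

-- literal port of Source B: rows = [[a+b for a,b in zip(ra[1:n], rb[1:n])] for ra,rb in zip(A,B)];
-- return [sum(col) for col in zip(*rows)]
def function_26_alt (A : List (List Int)) (B : List (List Int)) : List Int :=
  let n : Int := (A.length : Int)
  let rows := (List.zip A B).map (fun p =>
    (List.zip (PySem.List.slice p.1 (some 1) (some n))
              (PySem.List.slice p.2 (some 1) (some n))).map (fun q => q.1 + q.2))
  (pvZipStar rows).map (fun col => col.sum)

-- ===== PRECONDITION & SPEC =====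
-- Pre_ excludes exactly the inputs where Python A raises IndexError: whenever the
-- column loop runs (len(A) ≥ 2), B must have at least len(A) rows and every row of A
-- and of B's first len(A) rows must have at least len(A) entries.
def Pre_function_26 (A : List (List Int)) (B : List (List Int)) : Prop :=
  1 < A.length →
    (A.length ≤ B.length ∧ (∀ r ∈ A, A.length ≤ r.length) ∧
     (∀ r ∈ B.take A.length, A.length ≤ r.length))
instance (A : List (List Int)) (B : List (List Int)) : Decidable (Pre_function_26 A B) := by
  unfold Pre_function_26; infer_instance
def pvWitness_function_26 : List (List Int) × List (List Int) :=
  ([[1, 2], [3, 4]], [[5, 6], [7, 8]])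
def Spec_function_26 (A : List (List Int)) (B : List (List Int)) (out : List Int) : Prop := out = function_26_alt A B
instance (A : List (List Int)) (B : List (List Int)) (out : List Int) : Decidable (Spec_function_26 A B out) := by unfold Spec_function_26; infer_instance

-- ===== CLAIM (what is proved, stated in full; the proofs are below) =====
def Claim_equal_function_26 : Prop := ∀ (A : List (List Int)) (B : List (List Int)), Dom_function_26 A B → Pre_function_26 A B → Spec_function_26 A B (function_26 A B)

-- ===== LEMMAS AND PROOFS =====

-- zip(*S) on a rectangular S: column k is the list of the k-th entries of the rows
theorem pvZipStar_uniform (m : ℕ) : ∀ S : List (List Int), S ≠ [] →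
    (∀ r ∈ S, r.length = m) →
    pvZipStar S = (List.range m).map (fun k => S.map (fun r => r.getD k 0)) := by
  induction m with
  | zero =>
    intro S hne hlen
    have : [] ∈ S := by
      cases S with
      | nil => exact absurd rfl hne
      | cons r S =>
        have := hlen r (by simp)
        simp [List.length_eq_zero_iff.mp this]
    rw [pvZipStar.eq_def, dif_pos (Or.inr this)]
    simp
  | succ m ih =>
    intro S hne hlen
    have hmem : ¬ [] ∈ S := fun h => by simpa using hlen [] h
    rw [pvZipStar.eq_def, dif_neg (by push_neg; exact ⟨hne, hmem⟩)]
    have htne : S.map List.tail ≠ [] := by simpa using hne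
    have htlen : ∀ r ∈ S.map List.tail, r.length = m := by
      intro r hr
      obtain ⟨s, hs, rfl⟩ := List.mem_map.mp hr
      have := hlen s hs
      cases s with | nil => simp at this | cons x xs => simpa using this
    rw [ih (S.map List.tail) htne htlen]
    rw [List.range_succ_eq_map, List.map_cons, List.map_map]
    congr 1
    · apply List.map_congr_left
      intro r hr
      have : r ≠ [] := fun h => hmem (h ▸ hr)
      cases r with | nil => exact absurd rfl this | cons x xs => rfl
    · apply List.map_congr_left
      intro k _
      rw [List.map_map]
      apply List.map_congr_left
      intro r hr
      have : r ≠ [] := fun h => hmem (h ▸ hr)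
      cases r with
      | nil => exact absurd rfl this
      | cons x xs => simp [List.getD]

-- A's loop as a map of column sums
theorem pvA_eq_map (A B : List (List Int)) : function_26 A B =
    (PySem.List.pyRange 1 (A.length : Int) 1).map
      (fun j => ((PySem.List.pyRange 0 (A.length : Int) 1).map (fun i =>
        PySem.List.pyGetD (PySem.List.pyGetD A i []) j 0
        + PySem.List.pyGetD (PySem.List.pyGetD B i []) j 0)).sum) := by
  simp only [function_26]
  rw [PySem.List.foldl_append_singleton_eq_map]
  simp only [List.nil_append]
  apply List.map_congr_left
  intro j _
  rw [PySem.List.foldl_add (PySem.List.pyRange 0 (A.length : Int) 1)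
    (fun i => PySem.List.pyGetD (PySem.List.pyGetD A i []) j 0
      + PySem.List.pyGetD (PySem.List.pyGetD B i []) j 0) 0]
  simp

-- ===== VERDICT =====
theorem function_26_spec : Claim_equal_function_26 := by
  intro A B _ hpre
  unfold Spec_function_26
  by_cases hbig : 1 < A.length
  · obtain ⟨hB, hArows, hBrows⟩ := hpre hbig
    have hzipAB : (List.zip A B).length = A.length := by
      rw [List.length_zip]; omega
    have hmemTake : ∀ i (hi : i < A.length), B[i]'(by omega) ∈ B.take A.length := by
      intro i hi
      exact List.mem_iff_getElem.mpr ⟨i, by simp [List.length_take]; omega,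
        List.getElem_take⟩
    have hrowlen : ∀ r ∈ (List.zip A B).map (fun p =>
        (List.zip (PySem.List.slice p.1 (some 1) (some (A.length : Int)))
                  (PySem.List.slice p.2 (some 1) (some (A.length : Int)))).map
          (fun q => q.1 + q.2)),
        r.length = A.length - 1 := by
      intro r hr
      obtain ⟨p, hp, rfl⟩ := List.mem_map.mp hr
      obtain ⟨ha, hb⟩ := List.of_mem_zip hp
      have hbtake : p.2 ∈ B.take A.length := by
        obtain ⟨i, hi, hget⟩ := List.mem_iff_getElem.mp hp
        have hi' : i < A.length := by rwa [hzipAB] at hi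
        have hget' : p.2 = B[i]'(by omega) := by
          rw [List.getElem_zip] at hget
          exact (congrArg Prod.snd hget).symm
        rw [hget']
        exact hmemTake i hi'
      have h1 : A.length ≤ p.1.length := hArows p.1 ha
      have h2 : A.length ≤ p.2.length := hBrows p.2 hbtake
      rw [List.length_map, List.length_zip,
          PySem.List.slice_toNat p.1 (a:=1) (b:=(A.length : Int)) (by omega)
            (by omega),
          PySem.List.slice_toNat p.2 (a:=1) (b:=(A.length : Int)) (by omega)
            (by omega)]
      simp only [List.length_take, List.length_drop, Int.toNat_natCast, Int.toNat_one]
      omega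
    have hne : (List.zip A B).map (fun p =>
        (List.zip (PySem.List.slice p.1 (some 1) (some (A.length : Int)))
                  (PySem.List.slice p.2 (some 1) (some (A.length : Int)))).map
          (fun q => q.1 + q.2)) ≠ [] := by
      intro h
      have hlen0 := congrArg List.length h
      simp only [List.length_map, hzipAB, List.length_nil] at hlen0
      omega
    simp only [function_26_alt]
    rw [pvZipStar_uniform (A.length - 1) _ hne hrowlen, pvA_eq_map]
    apply List.ext_getElem
    · simp only [List.length_map, List.length_range, PySem.List.length_pyRange_one]
      omega
    · intro k hk1 hk2
      simp only [List.length_map, PySem.List.length_pyRange_one] at hk1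
      have hkn : k < A.length - 1 := by omega
      simp only [List.getElem_map, PySem.List.getElem_pyRange_one, List.getElem_range]
      congr 1
      apply List.ext_getElem
      · simp [PySem.List.length_pyRange_one, hzipAB]
      · intro i hi1 hi2
        simp only [List.length_map, PySem.List.length_pyRange_one] at hi1
        have hiA : i < A.length := by omega
        have hiB : i < B.length := by omega
        simp only [List.getElem_map, PySem.List.getElem_pyRange_one]
        have hgA : PySem.List.pyGetD A ((0 : Int) + (i : Int)) [] = A[i] := by
          rw [zero_add, PySem.List.pyGetD_natCast, List.getD_eq_getElem A [] hiA]
        have hgB : PySem.List.pyGetD B ((0 : Int) + (i : Int)) [] = B[i]'hiB := by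
          rw [zero_add, PySem.List.pyGetD_natCast, List.getD_eq_getElem B [] hiB]
        rw [hgA, hgB]
        have hAlen : A.length ≤ A[i].length := hArows A[i] (List.getElem_mem hiA)
        have hBlen : A.length ≤ (B[i]'hiB).length := hBrows _ (hmemTake i hiA)
        have hgetzip : (List.zip A B)[i]'(by omega) = (A[i], B[i]'hiB) :=
          List.getElem_zip ..
        rw [hgetzip]
        rw [PySem.List.slice_toNat A[i] (a:=1) (b:=(A.length : Int)) (by omega)
              (by omega),
            PySem.List.slice_toNat (B[i]'hiB) (a:=1) (b:=(A.length : Int)) (by omega)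
              (by omega)]
        simp only [Int.toNat_natCast, Int.toNat_one]
        have hzl : (List.zip ((A[i].drop 1).take (A.length - 1))
            (((B[i]'hiB).drop 1).take (A.length - 1))).length = A.length - 1 := by
          simp only [List.length_zip, List.length_take, List.length_drop]
          omega
        rw [List.getD_eq_getElem _ 0 (by rw [List.length_map, hzl]; omega)]
        simp only [List.getElem_map, List.getElem_zip]
        rw [List.getElem_take, List.getElem_drop, List.getElem_take, List.getElem_drop]
        have hj : (1 : Int) + (k : Int) = ((1 + k : ℕ) : Int) := by push_cast; ring
        rw [hj, PySem.List.pyGetD_natCast, PySem.List.pyGetD_natCast,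
            List.getD_eq_getElem A[i] 0 (by omega),
            List.getD_eq_getElem (B[i]'hiB) 0 (by omega)]
  · -- len(A) ≤ 1: A returns []; B's rows are empty or all-empty, so zip(*rows) = []
    have hn1 : A.length ≤ 1 := by omega
    have hBalt : function_26_alt A B = [] := by
      simp only [function_26_alt]
      have hz : pvZipStar ((List.zip A B).map (fun p =>
          (List.zip (PySem.List.slice p.1 (some 1) (some (A.length : Int)))
                    (PySem.List.slice p.2 (some 1) (some (A.length : Int)))).map
            (fun q => q.1 + q.2))) = [] := by
        by_cases he : (List.zip A B).map (fun p =>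
            (List.zip (PySem.List.slice p.1 (some 1) (some (A.length : Int)))
                      (PySem.List.slice p.2 (some 1) (some (A.length : Int)))).map
              (fun q => q.1 + q.2)) = []
        · rw [pvZipStar.eq_def, dif_pos (Or.inl he)]
        · rw [pvZipStar.eq_def, dif_pos (Or.inr ?_)]
          obtain ⟨r, hr⟩ := List.exists_mem_of_ne_nil _ he
          suffices hre : r = [] by exact hre ▸ hr
          obtain ⟨p, hp, rfl⟩ := List.mem_map.mp hr
          have hA1 : A.length = 1 := by
            have hAne : A ≠ [] := List.ne_nil_of_mem (List.of_mem_zip hp).1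
            have := List.length_pos_of_ne_nil hAne
            omega
          rw [PySem.List.slice_toNat p.1 (a:=1) (b:=(A.length : Int)) (by omega)
                (by omega)]
          simp [hA1]
      rw [hz]
      rfl
    rw [hBalt, pvA_eq_map,
        PySem.List.pyRange_one_eq_nil (a := 1) (b := (A.length : Int)) (by omega),
        List.map_nil]
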